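-- pv_equiv track=rewrite | github.com/maxcarriere/lectura-modules | Formules/src/lectura_formules/lecture_formules.py | _decomposer_blocs
-- ===== SOURCE A (Python) =====
-- def _decomposer_blocs(n: int) -> list[tuple[int, int]]:
--     """Décompose un entier en blocs de 3 chiffres.
--
--     Retourne [(position, valeur), ...] du bloc le plus significatif
--     au moins significatif. Position 0=unités, 1=milliers, 2=millions, etc.
--     """
--     if n == 0:
--         return [(0, 0)]
--
--     blocs: list[tuple[int, int]] = []
--     position = 0
--     remaining = abs(n)
--     while remaining > 0:
--         bloc_val = remaining % 1000
--         blocs.append((position, bloc_val))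
--         remaining //= 1000
--         position += 1
--
--     blocs.reverse()  # du plus significatif au moins
--     return blocs
-- ===== SOURCE B (Python) =====
-- def _decomposer_blocs(n: int) -> list[tuple[int, int]]:
--     m = abs(n)
--     k, t = 1, m // 1000
--     while t > 0:
--         k += 1
--         t //= 1000
--     return [(i, m // 1000 ** i % 1000) for i in range(k - 1, -1, -1)]
-- ===== Notes on version B (the rewrite author's own statement) =====
-- stated objective: alternative
-- what changed: A peels off three-digit blocks least-significant first with repeated modulus and floor division, appending pairs and reversing the list at the end; B first counts how many blocks there are and then emits them most-significant first by direct indexed division over a descending range, with no list reversal.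
import Mathlib
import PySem

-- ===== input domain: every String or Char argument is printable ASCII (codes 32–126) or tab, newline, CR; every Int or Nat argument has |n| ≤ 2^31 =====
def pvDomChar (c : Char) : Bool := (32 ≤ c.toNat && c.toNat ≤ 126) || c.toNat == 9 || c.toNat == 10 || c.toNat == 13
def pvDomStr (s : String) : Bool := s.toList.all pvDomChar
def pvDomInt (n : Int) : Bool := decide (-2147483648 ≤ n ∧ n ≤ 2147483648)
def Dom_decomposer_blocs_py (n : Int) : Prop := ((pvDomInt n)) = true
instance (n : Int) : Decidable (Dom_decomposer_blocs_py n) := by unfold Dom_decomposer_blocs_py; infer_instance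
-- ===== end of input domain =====

-- B replaces A's append-then-reverse accumulation by counting the base-1000 digits and
-- emitting each block front-to-back by direct indexed division (objective: alternative).

-- ===== PORT A =====
-- the while-loop of A: remaining/position/blocs state, appending at the back
def pvALoop (remaining position : Int) (acc : List (Int × Int)) : List (Int × Int) :=
  if h : 0 < remaining then
    pvALoop (PySem.Int.floordiv remaining 1000) (position + 1)
      (acc ++ [(position, PySem.Int.mod remaining 1000)])
  else acc
termination_by remaining.toNat
decreasing_by
  rw [PySem.Int.floordiv_eq_ediv_of_pos (by norm_num : (0:Int) < 1000)]; omega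

def decomposer_blocs_py (n : Int) : List (Int × Int) :=
  if n = 0 then [((0:Int), (0:Int))]
  else (pvALoop |n| 0 []).reverse

-- ===== PORT B =====
-- B's counting loop: k, t = 1, m // 1000; while t > 0: k += 1; t //= 1000
def pvBCount (t k : Int) : Int :=
  if h : 0 < t then pvBCount (PySem.Int.floordiv t 1000) (k + 1) else k
termination_by t.toNat
decreasing_by
  rw [PySem.Int.floordiv_eq_ediv_of_pos (by norm_num : (0:Int) < 1000)]; omega

-- 1000 ** i: every i produced by the range is ≥ 0, so ^ i.toNat is exact there
def decomposer_blocs_py_alt (n : Int) : List (Int × Int) :=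
  let m := |n|
  let k := pvBCount (PySem.Int.floordiv m 1000) 1
  (PySem.List.pyRange (k - 1) (-1) (-1)).map (fun i =>
    (i, PySem.Int.mod (PySem.Int.floordiv m ((1000:Int) ^ i.toNat)) 1000))

-- ===== PRECONDITION & SPEC =====
def Spec_decomposer_blocs_py (n : Int) (out : List (Int × Int)) : Prop := out = decomposer_blocs_py_alt n
instance (n : Int) (out : List (Int × Int)) : Decidable (Spec_decomposer_blocs_py n out) := by unfold Spec_decomposer_blocs_py; infer_instance

-- ===== CLAIM (what is proved, stated in full; the proofs are below) =====
def Claim_equal_decomposer_blocs_py : Prop := ∀ (n : Int), Dom_decomposer_blocs_py n → Spec_decomposer_blocs_py n (decomposer_blocs_py n)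

-- ===== LEMMAS AND PROOFS =====

-- number of base-1000 digits of m (0 for m ≤ 0); proof-only helper
def pvCnt (m : Int) : Nat :=
  if h : 0 < m then pvCnt (PySem.Int.floordiv m 1000) + 1 else 0
termination_by m.toNat
decreasing_by
  rw [PySem.Int.floordiv_eq_ediv_of_pos (by norm_num : (0:Int) < 1000)]; omega

lemma pvBCount_eq (t k : Int) (ht : 0 ≤ t) : pvBCount t k = k + (pvCnt t : Int) := by
  by_cases h : 0 < t
  · rw [pvBCount, pvCnt, dif_pos h, dif_pos h]
    have hnn : 0 ≤ PySem.Int.floordiv t 1000 := by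
      rw [PySem.Int.floordiv_eq_ediv_of_pos (by norm_num : (0:Int) < 1000)]
      exact Int.ediv_nonneg ht (by norm_num)
    rw [pvBCount_eq _ _ hnn]
    push_cast; ring
  · rw [pvBCount, pvCnt, dif_neg h, dif_neg h]; simp
termination_by t.toNat
decreasing_by
  rw [PySem.Int.floordiv_eq_ediv_of_pos (by norm_num : (0:Int) < 1000)]; omega

lemma pvCnt_pos_step (m : Int) (h : 0 < m) :
    pvCnt m = pvCnt (PySem.Int.floordiv m 1000) + 1 := by
  rw [pvCnt, dif_pos h]

-- A's loop produces exactly the indexed-division blocks, ascending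
lemma pvALoop_eq (m : Int) (hm : 0 < m) : ∀ (p : Int) (acc : List (Int × Int)),
    pvALoop m p acc = acc ++ (List.range (pvCnt m)).map
      (fun (j : Nat) => (p + (j : Int), PySem.Int.mod (PySem.Int.floordiv m ((1000:Int) ^ j)) 1000)) := by
  intro p acc
  have h1000 : (0:Int) < 1000 := by norm_num
  have hnn : 0 ≤ PySem.Int.floordiv m 1000 := by
    rw [PySem.Int.floordiv_eq_ediv_of_pos h1000]
    exact Int.ediv_nonneg (le_of_lt hm) (by norm_num)
  rw [pvALoop, dif_pos hm, pvCnt_pos_step m hm]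
  by_cases h : 0 < PySem.Int.floordiv m 1000
  · rw [pvALoop_eq _ h (p + 1) (acc ++ [(p, PySem.Int.mod m 1000)])]
    rw [List.append_assoc]
    congr 1
    rw [List.range_succ_eq_map]
    simp only [List.map_cons, List.map_map, List.singleton_append]
    refine List.cons_eq_cons.mpr ⟨?_, ?_⟩
    · simp
    · apply List.map_congr_left
      intro j _
      simp only [Function.comp]
      refine Prod.ext ?_ ?_
      · push_cast; ring
      · simp only
        congr 1
        rw [PySem.Int.floordiv_eq_ediv_of_pos h1000,
            PySem.Int.floordiv_eq_ediv_of_pos (by positivity : (0:Int) < (1000:Int) ^ j),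
            PySem.Int.floordiv_eq_ediv_of_pos (by positivity : (0:Int) < (1000:Int) ^ (j+1))]
        rw [Int.ediv_ediv_of_nonneg (by norm_num : (0:Int) ≤ 1000)]
        ring_nf
  · -- m < 1000: one block only
    have h0 : pvCnt (PySem.Int.floordiv m 1000) = 0 := by
      rw [pvCnt, dif_neg h]
    rw [pvALoop, dif_neg h, h0]
    simp
termination_by m.toNat
decreasing_by
  rw [PySem.Int.floordiv_eq_ediv_of_pos (by norm_num : (0:Int) < 1000)]; omega

-- ===== VERDICT (by name: the statement is the Claim_ definition above) =====
theorem decomposer_blocs_py_spec : Claim_equal_decomposer_blocs_py := by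
  intro n _
  unfold Spec_decomposer_blocs_py decomposer_blocs_py decomposer_blocs_py_alt
  by_cases h0 : n = 0
  · subst h0
    rw [if_pos rfl]
    simp only [abs_zero]
    have hb : pvBCount (PySem.Int.floordiv 0 1000) 1 = 1 := by
      rw [pvBCount]
      simp
      
    simp only [hb]
    norm_num
    rw [PySem.List.pyRange_neg_one_cons (by norm_num), PySem.List.pyRange_neg_one_eq_nil (by norm_num)]
    simp
  · rw [if_neg h0]
    have hm : 0 < |n| := abs_pos.mpr h0
    have hk : pvBCount (PySem.Int.floordiv |n| 1000) 1 = (pvCnt |n| : Int) := by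
      have hnn : 0 ≤ PySem.Int.floordiv |n| 1000 := by
        rw [PySem.Int.floordiv_eq_ediv_of_pos (by norm_num : (0:Int) < 1000)]
        exact Int.ediv_nonneg (le_of_lt hm) (by norm_num)
      rw [pvBCount_eq _ _ hnn, pvCnt_pos_step _ hm]
      push_cast; ring
    simp only [hk]
    rw [pvALoop_eq _ hm 0 []]
    have hrange : PySem.List.pyRange ((pvCnt |n| : Int) - 1) (-1) (-1)
        = (PySem.List.pyRange 0 (pvCnt |n| : Int) 1).reverse := by
      rw [PySem.List.pyRange_neg_one_eq_reverse]; norm_num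
    rw [hrange, PySem.List.pyRange_one]
    simp only [List.nil_append, List.map_reverse, List.map_map, sub_zero, Int.toNat_natCast]
    congr 1
    apply List.map_congr_left
    intro j _
    simp [Function.comp]
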